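-- pv_equiv track=rewrite | github.com/MrBrantCode/unitest_baseline | mut_generate/mist_train_cf/cf_53339/solution.py | find_unique_triplets
-- ===== SOURCE A (Python) =====
-- def find_unique_triplets(num_array, total):
--     num_array.sort()
--     len_array = len(num_array)
--     result = set()
--     for i in range(len_array):
--         for j in range(i+1, len_array):
--             for k in range(j+1, len_array):
--                 if num_array[i] + num_array[j] + num_array[k] == total:
--                     result.add((num_array[i], num_array[j], num_array[k]))
--     return len(result), result
-- ===== SOURCE B (Python) =====
-- def find_unique_triplets(num_array, total):
--     num_array.sort()
--     last = {v: i for i, v in enumerate(num_array)}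
--     found = set()
--     for i, a in enumerate(num_array):
--         rest = num_array[i + 1:]
--         for j, b in enumerate(rest, start=i + 1):
--             c = total - a - b
--             if last.get(c, -1) > j:
--                 found.add((a, b, c))
--     return len(found), found
-- ===== Notes on version B (the rewrite author's own statement) =====
-- stated objective: faster
-- what changed: B builds a value-to-last-index dict once over the sorted array and, instead of A's index-based triple loop, walks the sorted values with their suffixes (enumerate over suffixes) replacing the innermost k-scan by an O(1) lookup of total - a - b beyond j.
import Mathlib
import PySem

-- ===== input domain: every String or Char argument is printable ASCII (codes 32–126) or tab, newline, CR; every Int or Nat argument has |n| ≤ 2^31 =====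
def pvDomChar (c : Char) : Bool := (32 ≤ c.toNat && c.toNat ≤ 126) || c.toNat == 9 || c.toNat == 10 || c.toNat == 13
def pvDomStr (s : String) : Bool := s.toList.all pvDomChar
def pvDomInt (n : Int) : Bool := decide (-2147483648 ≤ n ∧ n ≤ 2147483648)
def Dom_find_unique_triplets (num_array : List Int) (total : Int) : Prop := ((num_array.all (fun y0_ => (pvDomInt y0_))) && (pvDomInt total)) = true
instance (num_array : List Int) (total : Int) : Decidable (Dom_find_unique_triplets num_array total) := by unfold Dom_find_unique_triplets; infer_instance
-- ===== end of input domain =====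

-- B builds a value→last-index dict once over the sorted array and walks the sorted values with
-- their suffixes, replacing A's innermost k-scan by one O(1) lookup: O(n^3) → O(n^2)
-- (objective: faster; asymptotic). Both A and B sort the argument list in place in Python;
-- the equivalence proved here is about the return value.

-- ===== PORT A =====
def find_unique_triplets (num_array : List Int) (total : Int) : Int × (List (Int × Int × Int)) :=
  let s := PySem.List.sorted num_array (fun x => x)
  let len_array : Int := s.length
  let result : PySem.Set (Int × Int × Int) :=
    (PySem.List.pyRange 0 len_array).foldl (fun r i =>
      (PySem.List.pyRange (i+1) len_array).foldl (fun r j =>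
        (PySem.List.pyRange (j+1) len_array).foldl (fun r k =>
          if PySem.List.pyGetD s i 0 + PySem.List.pyGetD s j 0 + PySem.List.pyGetD s k 0 == total then
            PySem.Set.add r (PySem.List.pyGetD s i 0, PySem.List.pyGetD s j 0, PySem.List.pyGetD s k 0)
          else r) r) r) PySem.Set.empty
  ((result.length : Int), result)

-- ===== PORT B =====
-- inner loop of Source B: 'for j, b in enumerate(rest, start=i+1): …' as recursion over the suffix
def pvInner (last : PySem.Dict Int Int) (total a : Int) : Int → List Int → PySem.Set (Int × Int × Int) → PySem.Set (Int × Int × Int)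
  | _, [], found => found
  | j, b :: rest, found =>
      let c := total - a - b
      pvInner last total a (j + 1) rest
        (if last.getD c (-1) > j then PySem.Set.add found (a, b, c) else found)

-- outer loop of Source B: 'for i, a in enumerate(num_array): …' as recursion over the sorted list
def pvOuter (last : PySem.Dict Int Int) (total : Int) : Int → List Int → PySem.Set (Int × Int × Int) → PySem.Set (Int × Int × Int)
  | _, [], found => found
  | i, a :: rest, found => pvOuter last total (i + 1) rest (pvInner last total a (i + 1) rest found)

def find_unique_triplets_alt (num_array : List Int) (total : Int) : Int × (List (Int × Int × Int)) :=
  let s := PySem.List.sorted num_array (fun x => x)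
  let last : PySem.Dict Int Int :=
    (PySem.List.enumerate s).foldl (fun d p => d.insert p.2 p.1) PySem.Dict.empty
  let found := pvOuter last total 0 s PySem.Set.empty
  ((found.length : Int), found)

-- ===== PRECONDITION & SPEC =====
def Spec_find_unique_triplets (num_array : List Int) (total : Int) (out : Int × (List (Int × Int × Int))) : Prop := out = find_unique_triplets_alt num_array total
instance (num_array : List Int) (total : Int) (out : Int × (List (Int × Int × Int))) : Decidable (Spec_find_unique_triplets num_array total out) := by unfold Spec_find_unique_triplets; infer_instance

-- ===== CLAIM (what is proved, stated in full; the proofs are below) =====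
def Claim_equal_find_unique_triplets : Prop := ∀ (num_array : List Int) (total : Int), Dom_find_unique_triplets num_array total → Spec_find_unique_triplets num_array total (find_unique_triplets num_array total)

-- ===== LEMMAS AND PROOFS =====

-- last index of v in s, if any (proof-only helper)
def pvLastIdx (s : List Int) (v : Int) : Option Nat :=
  match s with
  | [] => none
  | x :: t =>
    match pvLastIdx t v with
    | some m => some (m + 1)
    | none => if x = v then some 0 else none

lemma pvLastIdx_cons (x : Int) (t : List Int) (v : Int) :
    pvLastIdx (x :: t) v = match pvLastIdx t v with
      | some m => some (m + 1)
      | none => if x = v then some 0 else none := rfl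

lemma pvLastIdx_none (s : List Int) (v : Int) (h : pvLastIdx s v = none) : v ∉ s := by
  induction s with
  | nil => simp
  | cons x t ih =>
    rw [pvLastIdx_cons] at h
    cases ht : pvLastIdx t v with
    | some m => rw [ht] at h; simp at h
    | none =>
      rw [ht] at h
      by_cases hxv : x = v
      · rw [if_pos hxv] at h; simp at h
      · simp only [List.mem_cons, not_or]
        exact ⟨fun hc => hxv hc.symm, ih ht⟩

lemma pvLastIdx_some (s : List Int) (v : Int) (m : Nat) (h : pvLastIdx s v = some m) :
    m < s.length ∧ s[m]? = some v ∧ ∀ κ, m < κ → s[κ]? ≠ some v := by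
  induction s generalizing m with
  | nil => simp [pvLastIdx] at h
  | cons x t ih =>
    rw [pvLastIdx_cons] at h
    cases ht : pvLastIdx t v with
    | some m' =>
      rw [ht] at h
      have hm : m = m' + 1 := by simpa using h.symm
      obtain ⟨h1, h2, h3⟩ := ih m' ht
      subst hm
      refine ⟨by simpa using h1, by simpa using h2, ?_⟩
      intro κ hκ
      cases κ with
      | zero => omega
      | succ κ' => simpa using h3 κ' (by omega)
    | none =>
      rw [ht] at h
      by_cases hxv : x = v
      · rw [if_pos hxv] at h
        have hm : m = 0 := by simpa using h.symm
        subst hm hxv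
        refine ⟨by simp, by simp, ?_⟩
        intro κ hκ
        cases κ with
        | zero => omega
        | succ κ' =>
          simp only [List.getElem?_cons_succ]
          intro hc
          exact pvLastIdx_none t x ht (List.mem_of_getElem? hc)
      · rw [if_neg hxv] at h; simp at h

lemma pvLastIdx_getD (s : List Int) (v : Int) : ∀ (st : Int) (d : PySem.Dict Int Int),
    ((PySem.List.enumerate s st).foldl (fun d p => d.insert p.2 p.1) d).getD v (-1)
    = (pvLastIdx s v).elim (d.getD v (-1)) (fun m => st + (m : Int)) := by
  induction s with
  | nil => intro st d; simp [PySem.List.enumerate, pvLastIdx]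
  | cons x t ih =>
    intro st d
    simp only [PySem.List.enumerate, List.foldl_cons]
    rw [ih (st + 1) (d.insert x st), pvLastIdx_cons]
    cases ht : pvLastIdx t v with
    | some m => simp only [Option.elim_some]; push_cast; ring
    | none =>
      simp only [Option.elim_none, PySem.Dict.getD_insert]
      by_cases h1 : v = x
      · rw [if_pos h1, if_pos h1.symm]; simp
      · rw [if_neg h1, if_neg (fun h => h1 h.symm)]; simp

lemma pvFoldCollapse {α : Type} [BEq α] [LawfulBEq α] (q : Int → Bool) (f : Int → α) (t : α) :
    ∀ (ks : List Int), (∀ k ∈ ks, q k = true → f k = t) →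
    ∀ (r : PySem.Set α),
      ks.foldl (fun r k => if q k then PySem.Set.add r (f k) else r) r
        = if ks.any q then PySem.Set.add r t else r := by
  intro ks
  induction ks with
  | nil => intro _ r; simp
  | cons k ks ih =>
    intro h r
    simp only [List.foldl_cons, List.any_cons]
    by_cases hq : q k = true
    · rw [if_pos hq, h k (by simp) hq, ih (fun k hk => h k (by simp [hk]))]
      have hmem : t ∈ PySem.Set.add r t := by rw [PySem.Set.mem_add]; exact Or.inr rfl
      simp only [hq, Bool.true_or, if_true]
      split
      · rw [PySem.Set.add_of_mem hmem]
      · rfl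
    · rw [if_neg hq, ih (fun k hk => h k (by simp [hk]))]
      simp [Bool.of_not_eq_true hq]

-- B's inner recursion over the suffix s.drop j equals the index fold over range(j, n)
lemma pvInner_eq_fold (last : PySem.Dict Int Int) (total a : Int) (s : List Int) :
    ∀ (rest : List Int) (j : Int) (r : PySem.Set (Int × Int × Int)),
      0 ≤ j → rest = s.drop j.toNat →
      pvInner last total a j rest r
      = (PySem.List.pyRange j (s.length : Int)).foldl (fun r j' =>
          if last.getD (total - a - PySem.List.pyGetD s j' 0) (-1) > j' then
            PySem.Set.add r (a, PySem.List.pyGetD s j' 0, total - a - PySem.List.pyGetD s j' 0)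
          else r) r := by
  intro rest
  induction rest with
  | nil =>
    intro j r hj hdrop
    have hlen : s.length ≤ j.toNat := by
      have := congrArg List.length hdrop
      simp at this
      omega
    rw [PySem.List.pyRange_one_eq_nil (by omega)]
    rfl
  | cons b rest ih =>
    intro j r hj hdrop
    have hlt : j.toNat < s.length := by
      by_contra hge
      rw [List.drop_eq_nil_of_le (by omega)] at hdrop
      simp at hdrop
    have hcons := List.drop_eq_getElem_cons (l := s) hlt
    rw [← hdrop] at hcons
    have hb : s[j.toNat] = b := by
      have := hcons; injection this with h1 _; exact h1.symm
    have htail : rest = s.drop (j + 1).toNat := by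
      have := hcons; injection this with _ h2
      rw [h2]; congr 1; omega
    rw [PySem.List.pyRange_one_cons (by omega)]
    simp only [List.foldl_cons]
    rw [show pvInner last total a j (b :: rest) r
        = pvInner last total a (j + 1) rest
            (if last.getD (total - a - b) (-1) > j then PySem.Set.add r (a, b, total - a - b) else r)
        from rfl]
    have hget : PySem.List.pyGetD s j 0 = b := by
      rw [PySem.List.pyGetD_eq_getElem s 0 hj (by omega)]; exact hb
    rw [ih (j + 1) _ (by omega) htail, hget]

-- B's outer recursion over the suffix s.drop i equals the index fold over range(i, n)
lemma pvOuter_eq_fold (last : PySem.Dict Int Int) (total : Int) (s : List Int) :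
    ∀ (rest : List Int) (i : Int) (r : PySem.Set (Int × Int × Int)),
      0 ≤ i → rest = s.drop i.toNat →
      pvOuter last total i rest r
      = (PySem.List.pyRange i (s.length : Int)).foldl (fun r i' =>
          (PySem.List.pyRange (i'+1) (s.length : Int)).foldl (fun r j =>
            if last.getD (total - PySem.List.pyGetD s i' 0 - PySem.List.pyGetD s j 0) (-1) > j then
              PySem.Set.add r (PySem.List.pyGetD s i' 0, PySem.List.pyGetD s j 0,
                total - PySem.List.pyGetD s i' 0 - PySem.List.pyGetD s j 0)
            else r) r) r := by
  intro rest
  induction rest with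
  | nil =>
    intro i r hi hdrop
    have hlen : s.length ≤ i.toNat := by
      have := congrArg List.length hdrop
      simp at this
      omega
    rw [PySem.List.pyRange_one_eq_nil (by omega)]
    rfl
  | cons a rest ih =>
    intro i r hi hdrop
    have hlt : i.toNat < s.length := by
      by_contra hge
      rw [List.drop_eq_nil_of_le (by omega)] at hdrop
      simp at hdrop
    have hcons := List.drop_eq_getElem_cons (l := s) hlt
    rw [← hdrop] at hcons
    have ha : s[i.toNat] = a := by
      have := hcons; injection this with h1 _; exact h1.symm
    have htail : rest = s.drop (i + 1).toNat := by
      have := hcons; injection this with _ h2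
      rw [h2]; congr 1; omega
    rw [PySem.List.pyRange_one_cons (by omega)]
    simp only [List.foldl_cons]
    rw [show pvOuter last total i (a :: rest) r
        = pvOuter last total (i + 1) rest (pvInner last total a (i + 1) rest r) from rfl]
    have hget : PySem.List.pyGetD s i 0 = a := by
      rw [PySem.List.pyGetD_eq_getElem s 0 hi (by omega)]; exact ha
    rw [ih (i + 1) _ (by omega) htail,
        pvInner_eq_fold last total a s rest (i + 1) r (by omega) htail, hget]

-- the core equality: A's triple index fold equals the dict-lookup double fold (any list s)
lemma pvMain (s : List Int) (total : Int) :
    (PySem.List.pyRange 0 (s.length : Int)).foldl (fun r i =>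
      (PySem.List.pyRange (i+1) (s.length : Int)).foldl (fun r j =>
        (PySem.List.pyRange (j+1) (s.length : Int)).foldl (fun r k =>
          if PySem.List.pyGetD s i 0 + PySem.List.pyGetD s j 0 + PySem.List.pyGetD s k 0 == total then
            PySem.Set.add r (PySem.List.pyGetD s i 0, PySem.List.pyGetD s j 0, PySem.List.pyGetD s k 0)
          else r) r) r) PySem.Set.empty
    = (PySem.List.pyRange 0 (s.length : Int)).foldl (fun r i =>
      (PySem.List.pyRange (i+1) (s.length : Int)).foldl (fun r j =>
        if ((PySem.List.enumerate s).foldl (fun d p => d.insert p.2 p.1) PySem.Dict.empty).getD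
              (total - PySem.List.pyGetD s i 0 - PySem.List.pyGetD s j 0) (-1) > j then
          PySem.Set.add r (PySem.List.pyGetD s i 0, PySem.List.pyGetD s j 0,
            total - PySem.List.pyGetD s i 0 - PySem.List.pyGetD s j 0)
        else r) r) PySem.Set.empty := by
  apply PySem.List.foldl_congr_mem
  intro r0 i hi
  apply PySem.List.foldl_congr_mem
  intro r j hj
  rw [PySem.List.mem_pyRange_one] at hi hj
  set a := PySem.List.pyGetD s i 0
  set b := PySem.List.pyGetD s j 0
  set need := total - a - b with hneed
  rw [pvFoldCollapse (fun k => PySem.List.pyGetD s i 0 + PySem.List.pyGetD s j 0 + PySem.List.pyGetD s k 0 == total)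
        (fun k => (PySem.List.pyGetD s i 0, PySem.List.pyGetD s j 0, PySem.List.pyGetD s k 0))
        (a, b, need)
        _ ?side r]
  case side =>
    intro k _ hk
    have : a + b + PySem.List.pyGetD s k 0 = total := by exact_mod_cast beq_iff_eq.mp hk
    simp only [Prod.mk.injEq]
    refine ⟨rfl, rfl, by omega⟩
  have hcond : ((PySem.List.pyRange (j+1) (s.length : Int)).any
        (fun k => PySem.List.pyGetD s i 0 + PySem.List.pyGetD s j 0 + PySem.List.pyGetD s k 0 == total) = true)
      ↔ (((PySem.List.enumerate s).foldl (fun d p => d.insert p.2 p.1) PySem.Dict.empty).getD need (-1) > j) := by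
    rw [pvLastIdx_getD s need 0 PySem.Dict.empty]
    rw [List.any_eq_true]
    cases hL : pvLastIdx s need with
    | none =>
      simp only [Option.elim_none, PySem.Dict.getD_empty]
      constructor
      · rintro ⟨k, hk, hkq⟩
        rw [PySem.List.mem_pyRange_one] at hk
        have hsum : a + b + PySem.List.pyGetD s k 0 = total := by exact_mod_cast beq_iff_eq.mp hkq
        have h0k : 0 ≤ k := by omega
        have hkl : k < (s.length : Int) := hk.2
        have hget : PySem.List.pyGetD s k 0 = s[k.toNat] := PySem.List.pyGetD_eq_getElem s 0 h0k hkl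
        have : need ∈ s := by
          have : s[k.toNat] = need := by omega
          exact this ▸ List.getElem_mem _
        exact absurd this (pvLastIdx_none s need hL)
      · intro hgt; omega
    | some m =>
      obtain ⟨hm1, hm2, hm3⟩ := pvLastIdx_some s need m hL
      simp only [Option.elim_some]
      constructor
      · rintro ⟨k, hk, hkq⟩
        rw [PySem.List.mem_pyRange_one] at hk
        have hsum : a + b + PySem.List.pyGetD s k 0 = total := by exact_mod_cast beq_iff_eq.mp hkq
        have h0k : 0 ≤ k := by omega
        have hget : PySem.List.pyGetD s k 0 = s[k.toNat] := PySem.List.pyGetD_eq_getElem s 0 h0k hk.2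
        have hkn : k.toNat < s.length := by omega
        have hkv : s[k.toNat]? = some need := by
          rw [List.getElem?_eq_getElem hkn]
          have : s[k.toNat] = need := by omega
          rw [this]
        have hle : k.toNat ≤ m := by
          by_contra hgt
          exact hm3 k.toNat (by omega) hkv
        omega
      · intro hgt
        refine ⟨(m : Int), ?_, ?_⟩
        · rw [PySem.List.mem_pyRange_one]
          constructor
          · omega
          · exact_mod_cast hm1
        · have hget : PySem.List.pyGetD s (m : Int) 0 = s[((m : Int)).toNat] :=
            PySem.List.pyGetD_eq_getElem s 0 (by positivity) (by exact_mod_cast hm1)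
          have hv : s[m] = need := by
            have := List.getElem?_eq_getElem hm1
            rw [hm2] at this
            exact (Option.some_injective _ this).symm
          rw [beq_iff_eq, hget]
          simp only [Int.toNat_natCast]
          omega
  by_cases hc : ((PySem.List.enumerate s).foldl (fun d p => d.insert p.2 p.1) PySem.Dict.empty).getD need (-1) > j
  · rw [if_pos (hcond.mpr hc), if_pos hc]
  · rw [if_neg (fun h => hc (hcond.mp h)), if_neg hc]

-- ===== VERDICT (by name: the statement is the Claim_ definition above) =====
theorem find_unique_triplets_spec : Claim_equal_find_unique_triplets := by
  intro num_array total _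
  unfold Spec_find_unique_triplets find_unique_triplets find_unique_triplets_alt
  set s := PySem.List.sorted num_array (fun x => x) with hs
  have hB := pvOuter_eq_fold
      ((PySem.List.enumerate s).foldl (fun d p => d.insert p.2 p.1) PySem.Dict.empty)
      total s s 0 PySem.Set.empty le_rfl (by simp)
  simp only []
  rw [hB, pvMain s total]
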